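-- pv_equiv track=rewrite | github.com/biniamgebremichael/timorph | src/api.py | consumer
-- ===== SOURCE A (Python) =====
-- def consumer(maps):
--     unique= set()
--     count = 0
--     total = 0
--     for x in maps:
--         for y in maps[x]:
--             total = total+1
--             if(maps[x][y][1]):
--                count= count+1
--                unique.add(maps[x][y][0])
--     return total, count,len(unique)
-- ===== SOURCE B (Python) =====
-- def consumer(maps):
--     total = 0
--     firsts = []
--     for inner in maps.values():
--         total += len(inner)
--         for v in inner.values():
--             if v[1]:
--                 firsts.append(v[0])
--     firsts.sort()
--     unique = 0
--     prev = None
--     for k in firsts: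
--         if prev != k:
--             unique += 1
--         prev = k
--     return total, len(firsts), unique
-- ===== Notes on version B (the rewrite author's own statement) =====
-- stated objective: alternative
-- what changed: Replaces A's fused per-item loop with set+two counters by a different algorithm: total is accumulated arithmetically from inner-dict lengths, flagged first-components are collected into a list, and uniqueness is computed by sort-then-scan (counting boundaries between adjacent unequal elements of the sorted list) instead of a hash set.
import Mathlib
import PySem

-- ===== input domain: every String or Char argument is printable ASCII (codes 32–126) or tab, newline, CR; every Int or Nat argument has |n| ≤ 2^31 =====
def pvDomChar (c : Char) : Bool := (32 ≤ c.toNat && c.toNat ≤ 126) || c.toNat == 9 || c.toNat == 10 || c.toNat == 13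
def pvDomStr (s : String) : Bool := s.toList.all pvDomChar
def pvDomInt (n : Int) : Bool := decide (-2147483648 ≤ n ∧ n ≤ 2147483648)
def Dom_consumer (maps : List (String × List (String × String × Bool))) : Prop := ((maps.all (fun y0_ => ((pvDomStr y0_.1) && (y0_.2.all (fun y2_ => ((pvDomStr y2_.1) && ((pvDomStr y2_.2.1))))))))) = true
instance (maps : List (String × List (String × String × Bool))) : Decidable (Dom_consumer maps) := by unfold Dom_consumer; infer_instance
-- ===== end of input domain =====

-- B replaces A's fused loop (set + two counters) by a different algorithm: totals from inner lengths, then sort-then-scan over the flagged first components to count distinct values (objective: alternative).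


-- ===== PORT A =====
-- state = (unique, count, total); 'for x in maps: for y in maps[x]: … maps[x][y] …'
-- iterates the dict's items in insertion order, so the fold runs over the pairs directly.
def consumer (maps : List (String × List (String × String × Bool))) : Int × Int × Int :=
  let st : PySem.Set String × Int × Int :=
    maps.foldl (fun st p =>
      p.2.foldl (fun st q =>
        let total := st.2.2 + 1
        if q.2.2 then (PySem.Set.add st.1 q.2.1, st.2.1 + 1, total)
        else (st.1, st.2.1, total)) st)
      (PySem.Set.empty, 0, 0)
  (st.2.2, st.2.1, (st.1.length : Int))

-- ===== PORT B =====
-- total += len(inner); flagged first components appended to 'firsts'; firsts.sort();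
-- then a scan counting positions where the element differs from its predecessor (prev = None at start).
def consumer_alt (maps : List (String × List (String × String × Bool))) : Int × Int × Int :=
  let st : Int × List String :=
    maps.foldl (fun st p =>
      let total := st.1 + (p.2.length : Int)
      let firsts := p.2.foldl (fun fs q => if q.2.2 then fs ++ [q.2.1] else fs) st.2
      (total, firsts)) (0, [])
  let sortedFirsts := PySem.List.sorted st.2 (fun x => x) false
  let scan : Int × Option String :=
    sortedFirsts.foldl (fun s k => if s.2 ≠ some k then (s.1 + 1, some k) else (s.1, some k))
      (0, (none : Option String))
  (st.1, (st.2.length : Int), scan.1)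

-- ===== PRECONDITION & SPEC =====
def Spec_consumer (maps : List (String × List (String × String × Bool))) (out : Int × Int × Int) : Prop := out = consumer_alt maps
instance (maps : List (String × List (String × String × Bool))) (out : Int × Int × Int) : Decidable (Spec_consumer maps out) := by unfold Spec_consumer; infer_instance

-- ===== CLAIM =====
def Claim_equal_consumer : Prop := ∀ (maps : List (String × List (String × String × Bool))), Dom_consumer maps → Spec_consumer maps (consumer maps)

-- ===== LEMMAS AND PROOFS =====

-- A's inner loop over a flat list of (value, flag) pairs, from an arbitrary state.
theorem consumer_inner_fold (vs : List (String × Bool))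
    (u : PySem.Set String) (c t : Int) :
    vs.foldl (fun st q =>
        let total := st.2.2 + 1
        if q.2 then (PySem.Set.add st.1 q.1, st.2.1 + 1, total)
        else (st.1, st.2.1, total)) (u, c, t)
      = (((vs.filter (·.2)).map (·.1)).foldl PySem.Set.add u,
         c + ((vs.filter (·.2)).length : Int), t + (vs.length : Int)) := by
  induction vs generalizing u c t with
  | nil => simp
  | cons v vs ih =>
    rcases v with ⟨s, b⟩
    cases b <;> simp [ih] <;> ring_nf <;> simp_all

-- A's whole fused loop from an arbitrary state, against the flattened item list.
theorem consumer_outer_fold (ms : List (String × List (String × String × Bool)))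
    (u : PySem.Set String) (c t : Int) :
    ms.foldl (fun st p =>
        p.2.foldl (fun st q =>
          let total := st.2.2 + 1
          if q.2.2 then (PySem.Set.add st.1 q.2.1, st.2.1 + 1, total)
          else (st.1, st.2.1, total)) st) (u, c, t)
      = (let items := (ms.map (·.2)).flatMap (fun inner => inner.map (·.2))
         ((((items.filter (·.2)).map (·.1)).foldl PySem.Set.add u),
          c + ((items.filter (·.2)).length : Int), t + (items.length : Int))) := by
  induction ms generalizing u c t with
  | nil => simp
  | cons m ms ih =>
    have hmap : m.2.foldl (fun st (q : String × String × Bool) =>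
        let total := st.2.2 + 1
        if q.2.2 then (PySem.Set.add st.1 q.2.1, st.2.1 + 1, total)
        else (st.1, st.2.1, total)) (u, c, t)
        = (m.2.map (·.2)).foldl (fun st (q : String × Bool) =>
            let total := st.2.2 + 1
            if q.2 then (PySem.Set.add st.1 q.1, st.2.1 + 1, total)
            else (st.1, st.2.1, total)) (u, c, t) := by
      rw [List.foldl_map]
    simp only [List.foldl_cons, hmap, consumer_inner_fold, ih, List.map_cons,
      List.flatMap_cons, List.filter_append, List.map_append, List.foldl_append,
      List.length_append]
    refine Prod.ext rfl (Prod.ext (by push_cast; ring) (by push_cast; ring))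

-- B's collection loop from an arbitrary state, against the flattened item list.
theorem consumer_alt_collect (ms : List (String × List (String × String × Bool)))
    (t : Int) (fs : List String) :
    ms.foldl (fun st p =>
        let total := st.1 + (p.2.length : Int)
        let firsts := p.2.foldl (fun fs q => if q.2.2 then fs ++ [q.2.1] else fs) st.2
        (total, firsts)) (t, fs)
      = (let items := (ms.map (·.2)).flatMap (fun inner => inner.map (·.2))
         (t + (items.length : Int), fs ++ (items.filter (·.2)).map (·.1))) := by
  induction ms generalizing t fs with
  | nil => simp
  | cons m ms ih =>
    have hinner : m.2.foldl (fun fs (q : String × String × Bool) =>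
        if q.2.2 then fs ++ [q.2.1] else fs) fs
        = fs ++ (m.2.filter (·.2.2)).map (·.2.1) :=
      PySem.List.foldl_append_if _ _ _ _
    simp only [List.foldl_cons, hinner, ih, List.map_cons, List.flatMap_cons,
      List.filter_append, List.map_append, List.length_append, List.filter_map,
      List.map_map]
    refine Prod.ext (by simp only [List.length_map]; push_cast; ring) (by simp [Function.comp_def])

theorem card_insert_erase (s : Finset String) (a : String) :
    (insert a s).card = (s.erase a).card + 1 := by
  by_cases h : a ∈ s
  · rw [Finset.insert_eq_self.mpr h]
    exact (Finset.card_erase_add_one h).symm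
  · rw [Finset.erase_eq_self.mpr h, Finset.card_insert_of_notMem h]

-- One scan step over a sorted tail: the count equals the number of distinct elements different from prev.
theorem scan_sorted_some (l : List String) (a : String) (c : Int)
    (h : (a :: l).Pairwise (· ≤ ·)) :
    (l.foldl (fun s k => if s.2 ≠ some k then (s.1 + 1, some k) else (s.1, some k))
        (c, (some a : Option String))).1
      = c + ((l.toFinset.erase a).card : Int) := by
  induction l generalizing a c with
  | nil => simp
  | cons b t ih =>
    rw [List.pairwise_cons] at h
    obtain ⟨ha, hbt⟩ := h
    by_cases hab : a = b
    · subst hab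
      have hstep : ((a :: t).foldl
          (fun s k => if s.2 ≠ some k then (s.1 + 1, some k) else (s.1, some k))
          (c, (some a : Option String)))
          = t.foldl (fun s k => if s.2 ≠ some k then (s.1 + 1, some k) else (s.1, some k))
              (c, (some a : Option String)) := by
        simp
      rw [hstep, ih a c hbt]
      have herase : ((a :: t).toFinset.erase a) = t.toFinset.erase a := by
        simp [Finset.erase_insert_eq_erase]
      rw [herase]
    · have hlt : a < b := lt_of_le_of_ne (ha b (by simp)) hab
      have hstep : ((b :: t).foldl
          (fun s k => if s.2 ≠ some k then (s.1 + 1, some k) else (s.1, some k))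
          (c, (some a : Option String)))
          = t.foldl (fun s k => if s.2 ≠ some k then (s.1 + 1, some k) else (s.1, some k))
              (c + 1, (some b : Option String)) := by
        simp [hab]
      rw [hstep, ih b (c + 1) hbt]
      have hanotin : a ∉ (b :: t).toFinset := by
        simp only [List.toFinset_cons, Finset.mem_insert, List.mem_toFinset]
        rintro (rfl | hmem)
        · exact absurd rfl hab
        · exact absurd rfl (ne_of_lt (lt_of_lt_of_le hlt (List.rel_of_pairwise_cons hbt hmem))).symm
      rw [Finset.erase_eq_self.mpr hanotin]
      have hcard : (b :: t).toFinset.card = (t.toFinset.erase b).card + 1 := by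
        simp only [List.toFinset_cons]
        exact card_insert_erase _ _
      rw [hcard]
      push_cast
      ring

-- The whole scan over any sorted list counts the distinct elements.
theorem scan_sorted (l : List String) (h : l.Pairwise (· ≤ ·)) :
    (l.foldl (fun s k => if s.2 ≠ some k then (s.1 + 1, some k) else (s.1, some k))
        (0, (none : Option String))).1
      = (l.toFinset.card : Int) := by
  cases l with
  | nil => simp
  | cons a t =>
    have hstep : ((a :: t).foldl
        (fun s k => if s.2 ≠ some k then (s.1 + 1, some k) else (s.1, some k))
        ((0 : Int), (none : Option String)))
        = t.foldl (fun s k => if s.2 ≠ some k then (s.1 + 1, some k) else (s.1, some k))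
            (1, (some a : Option String)) := by
      simp
    rw [hstep, scan_sorted_some t a 1 h]
    have : (a :: t).toFinset.card = (t.toFinset.erase a).card + 1 := by
      simp only [List.toFinset_cons]
      exact card_insert_erase _ _
    rw [this]
    push_cast
    ring

-- A set built with Set.add has as many elements as the list has distinct members.
theorem ofList_length_eq_toFinset_card (xs : List String) :
    ((PySem.Set.ofList xs).length : Int) = (xs.toFinset.card : Int) := by
  have hnd : (PySem.Set.ofList xs).Nodup := PySem.Set.nodup_ofList xs
  have hts : (PySem.Set.ofList xs).toFinset = xs.toFinset := by
    ext x
    simp [List.mem_toFinset, PySem.Set.mem_ofList]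
  rw [← List.toFinset_card_of_nodup hnd, hts]

theorem consumer_spec : Claim_equal_consumer := by
  intro maps _
  show consumer maps = consumer_alt maps
  simp only [consumer, consumer_alt, consumer_outer_fold, consumer_alt_collect]
  set items := (maps.map (·.2)).flatMap (fun inner => inner.map (·.2)) with hitems
  set fs := (items.filter (·.2)).map (·.1) with hfs
  have hsortperm : (PySem.List.sorted fs (fun x => x) false).Perm fs :=
    PySem.List.sorted_perm fs (fun x => x) false
  have hpw : (PySem.List.sorted fs (fun x => x) false).Pairwise (· ≤ ·) :=
    PySem.List.sorted_pairwise fs (fun x => x)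
  have hscan := scan_sorted (PySem.List.sorted fs (fun x => x) false) hpw
  have hsetlen : ((fs.foldl PySem.Set.add PySem.Set.empty).length : Int)
      = (fs.toFinset.card : Int) := by
    have hofl : fs.foldl PySem.Set.add PySem.Set.empty = PySem.Set.ofList fs := rfl
    rw [hofl]
    exact ofList_length_eq_toFinset_card fs
  simp only [zero_add, List.nil_append]
  refine Prod.ext rfl (Prod.ext ?_ ?_)
  · simp [hfs]
  · simp only [hscan, hsetlen]
    congr 2
    ext x
    simp [hsortperm.mem_iff]
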